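-- pv_equiv track=rewrite | github.com/feiloo/ngs_pipeline | workflow/process_variantlists/python/process_xlsx/process_variantlists_utils.py | rename_all_sheets
-- ===== SOURCE A (Python) =====
-- def rename_all_sheets(names_all_sheets, index_cov_sheets, index_unfil_sheets,\
--                       index_fil_sheets):
--
--     renamed_all_sheets = [renamed.split("_" "")[0]\
--                           for renamed in names_all_sheets]
--
--     # Rename cov_sheets
--     cov_sheets_renamed = map(renamed_all_sheets.__getitem__, index_cov_sheets)
--     cov_sheets_renamed = list(cov_sheets_renamed)
--     cov_sheets_renamed = [cov_sheets_renamed_c + "_c"\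
--                           for cov_sheets_renamed_c in cov_sheets_renamed]
--
--     # Rename unfil_sheets
--     unfil_sheets_renamed = map(renamed_all_sheets.__getitem__,\
--                                index_unfil_sheets)
--     unfil_sheets_renamed= list(unfil_sheets_renamed)
--     unfil_sheets_renamed= [unfil_sheets_renamed_c + "_u"\
--                           for unfil_sheets_renamed_c in unfil_sheets_renamed]
--
--     # Rename fil_sheets
--     fil_sheets_renamed = map(renamed_all_sheets.__getitem__, index_fil_sheets)
--     fil_sheets_renamed= list(fil_sheets_renamed)
--     fil_sheets_renamed= [fil_sheets_renamed_c + "_f"\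
--                           for fil_sheets_renamed_c in fil_sheets_renamed]
--
--     # Concatenate lists
--     all_sheets_renamed = [item for sublist in\
--                           zip(cov_sheets_renamed, unfil_sheets_renamed,\
--                               fil_sheets_renamed) for item in sublist]
--
--     return all_sheets_renamed
-- ===== SOURCE B (Python) =====
-- def rename_all_sheets(names_all_sheets, index_cov_sheets, index_unfil_sheets,
--                       index_fil_sheets):
--     renamed = [name.split("_")[0] for name in names_all_sheets]
--     out = []
--     for c, u, f in zip(index_cov_sheets, index_unfil_sheets, index_fil_sheets):
--         out.append(renamed[c] + "_c")
--         out.append(renamed[u] + "_u")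
--         out.append(renamed[f] + "_f")
--     return out
-- ===== Notes on version B (the rewrite author's own statement) =====
-- stated objective: simpler
-- what changed: B interleaves in a single pass over the zipped index triples, appending the '_c'/'_u'/'_f' suffixed names directly, instead of building three separate suffixed lists and flattening their zip.
import Mathlib
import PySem

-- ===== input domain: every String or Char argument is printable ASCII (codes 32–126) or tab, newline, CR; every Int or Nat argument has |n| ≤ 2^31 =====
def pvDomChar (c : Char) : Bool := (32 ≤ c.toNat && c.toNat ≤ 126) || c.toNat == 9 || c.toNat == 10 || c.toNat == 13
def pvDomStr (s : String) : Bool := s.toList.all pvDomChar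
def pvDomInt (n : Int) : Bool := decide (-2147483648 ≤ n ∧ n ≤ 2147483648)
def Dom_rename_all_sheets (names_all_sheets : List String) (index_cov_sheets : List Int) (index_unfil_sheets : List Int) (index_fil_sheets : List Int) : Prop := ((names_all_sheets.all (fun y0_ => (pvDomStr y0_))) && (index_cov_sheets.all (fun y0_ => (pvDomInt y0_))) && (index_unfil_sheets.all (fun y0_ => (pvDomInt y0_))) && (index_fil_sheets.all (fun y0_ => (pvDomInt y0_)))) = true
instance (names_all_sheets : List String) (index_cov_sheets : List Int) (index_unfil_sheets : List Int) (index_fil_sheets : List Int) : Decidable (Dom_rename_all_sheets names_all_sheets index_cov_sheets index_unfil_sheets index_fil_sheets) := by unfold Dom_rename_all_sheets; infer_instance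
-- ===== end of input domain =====

-- B interleaves in one pass over the zipped index triples instead of building three
-- suffixed lists and flattening their zip (objective: simpler).

-- ===== PORT A =====
def rename_all_sheets (names_all_sheets : List String) (index_cov_sheets : List Int) (index_unfil_sheets : List Int) (index_fil_sheets : List Int) : List String :=
  let renamed_all_sheets := names_all_sheets.map (fun renamed => ((PySem.Str.split? renamed "_").getD []).headD "")
  let cov_sheets_renamed := index_cov_sheets.map (fun i => PySem.List.pyGetD renamed_all_sheets i "")
  let cov_sheets_renamed := cov_sheets_renamed.map (fun c => c ++ "_c")
  let unfil_sheets_renamed := index_unfil_sheets.map (fun i => PySem.List.pyGetD renamed_all_sheets i "")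
  let unfil_sheets_renamed := unfil_sheets_renamed.map (fun c => c ++ "_u")
  let fil_sheets_renamed := index_fil_sheets.map (fun i => PySem.List.pyGetD renamed_all_sheets i "")
  let fil_sheets_renamed := fil_sheets_renamed.map (fun c => c ++ "_f")
  (cov_sheets_renamed.zip (unfil_sheets_renamed.zip fil_sheets_renamed)).flatMap
    (fun t => [t.1, t.2.1, t.2.2])

-- ===== PORT B =====
def rename_all_sheets_alt (names_all_sheets : List String) (index_cov_sheets : List Int) (index_unfil_sheets : List Int) (index_fil_sheets : List Int) : List String :=
  let renamed := names_all_sheets.map (fun name => ((PySem.Str.split? name "_").getD []).headD "")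
  (index_cov_sheets.zip (index_unfil_sheets.zip index_fil_sheets)).flatMap
    (fun t => [PySem.List.pyGetD renamed t.1 "" ++ "_c",
               PySem.List.pyGetD renamed t.2.1 "" ++ "_u",
               PySem.List.pyGetD renamed t.2.2 "" ++ "_f"])

-- ===== PRECONDITION & SPEC =====
-- A raises IndexError on any index outside [-len, len); exactly those inputs are excluded.
def Pre_rename_all_sheets (names_all_sheets : List String) (index_cov_sheets : List Int) (index_unfil_sheets : List Int) (index_fil_sheets : List Int) : Prop :=
  (∀ i ∈ index_cov_sheets, PySem.Raise.InRange names_all_sheets.length i) ∧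
  (∀ i ∈ index_unfil_sheets, PySem.Raise.InRange names_all_sheets.length i) ∧
  (∀ i ∈ index_fil_sheets, PySem.Raise.InRange names_all_sheets.length i)
instance (names_all_sheets : List String) (index_cov_sheets : List Int) (index_unfil_sheets : List Int) (index_fil_sheets : List Int) : Decidable (Pre_rename_all_sheets names_all_sheets index_cov_sheets index_unfil_sheets index_fil_sheets) := by unfold Pre_rename_all_sheets; infer_instance

def pvWitness_rename_all_sheets : List String × List Int × List Int × List Int :=
  (["a_1", "b_2", "c"], [0], [1], [2])

def Spec_rename_all_sheets (names_all_sheets : List String) (index_cov_sheets : List Int) (index_unfil_sheets : List Int) (index_fil_sheets : List Int) (out : List String) : Prop := out = rename_all_sheets_alt names_all_sheets index_cov_sheets index_unfil_sheets index_fil_sheets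
instance (names_all_sheets : List String) (index_cov_sheets : List Int) (index_unfil_sheets : List Int) (index_fil_sheets : List Int) (out : List String) : Decidable (Spec_rename_all_sheets names_all_sheets index_cov_sheets index_unfil_sheets index_fil_sheets out) := by unfold Spec_rename_all_sheets; infer_instance

-- ===== CLAIM =====
def Claim_equal_rename_all_sheets : Prop := ∀ (names_all_sheets : List String) (index_cov_sheets : List Int) (index_unfil_sheets : List Int) (index_fil_sheets : List Int), Dom_rename_all_sheets names_all_sheets index_cov_sheets index_unfil_sheets index_fil_sheets → Pre_rename_all_sheets names_all_sheets index_cov_sheets index_unfil_sheets index_fil_sheets → Spec_rename_all_sheets names_all_sheets index_cov_sheets index_unfil_sheets index_fil_sheets (rename_all_sheets names_all_sheets index_cov_sheets index_unfil_sheets index_fil_sheets)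

-- ===== LEMMAS AND PROOFS =====
-- Zipping three mapped lists and flattening equals flat-mapping the zip of the raw lists.
theorem pv_zip3_map_flatMap (f g h : Int → String) :
    ∀ (ic iu ifl : List Int),
      ((ic.map f).zip ((iu.map g).zip (ifl.map h))).flatMap (fun t => [t.1, t.2.1, t.2.2])
        = (ic.zip (iu.zip ifl)).flatMap (fun t => [f t.1, g t.2.1, h t.2.2]) := by
  intro ic
  induction ic with
  | nil => intro iu ifl; simp
  | cons c cs ih =>
    intro iu ifl
    cases iu with
    | nil => simp
    | cons u us =>
      cases ifl with
      | nil => simp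
      | cons x xs => simp [ih]

-- ===== VERDICT =====
theorem rename_all_sheets_spec : Claim_equal_rename_all_sheets := by
  intro ns ic iu ifl _ _
  unfold Spec_rename_all_sheets rename_all_sheets rename_all_sheets_alt
  simp only [List.map_map]
  exact pv_zip3_map_flatMap _ _ _ ic iu ifl
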